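-- pv_equiv track=rewrite | github.com/CypherpunkSamurai/portable-windows-installers | portable_msvc.py | parse_available_versions
-- ===== SOURCE A (Python) =====
-- def parse_available_versions(vs_manifest):
--     """Parse available MSVC and SDK versions"""
--     packages = {}
--     for package in vs_manifest["packages"]:
--         package_id = package["id"].lower()
--         packages.setdefault(package_id, []).append(package)
--
--     msvc_versions = {}
--     sdk_versions = {}
--
--     for package_id, package_list in packages.items():
--         # Parse MSVC versions
--         if package_id.startswith("microsoft.vc.") and package_id.endswith(
--             ".tools.hostx64.targetx64.base"
--         ):
--             version = ".".join(package_id.split(".")[2:4])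
--             if version[0].isnumeric():
--                 msvc_versions[version] = package_id
--
--         # Parse SDK versions
--         elif package_id.startswith(
--             "microsoft.visualstudio.component.windows10sdk."
--         ) or package_id.startswith(
--             "microsoft.visualstudio.component.windows11sdk."
--         ):
--             version = package_id.split(".")[-1]
--             if version.isnumeric():
--                 sdk_versions[version] = package_id
--
--     return packages, msvc_versions, sdk_versions
-- ===== SOURCE B (Python) =====
-- def _msvc_version(pid):
--     """version extracted from an MSVC tools package id, else None"""
--     if pid.startswith("microsoft.vc.") and pid.endswith(".tools.hostx64.targetx64.base"):
--         version = ".".join(pid.split(".")[2:4])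
--         if version[0].isnumeric():
--             return version
--     return None
--
--
-- def _sdk_version(pid):
--     """version extracted from a Windows 10/11 SDK component id, else None"""
--     if pid.startswith(("microsoft.visualstudio.component.windows10sdk.",
--                        "microsoft.visualstudio.component.windows11sdk.")):
--         version = pid.split(".")[-1]
--         if version.isnumeric():
--             return version
--     return None
--
--
-- def parse_available_versions(vs_manifest):
--     """Parse available MSVC and SDK versions"""
--     pkgs = vs_manifest["packages"]
--     ids = [p["id"].lower() for p in pkgs]
--     distinct = list(dict.fromkeys(ids))
--     packages = {pid: [p for i, p in zip(ids, pkgs) if i == pid] for pid in distinct}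
--     msvc_versions = {_msvc_version(pid): pid for pid in distinct
--                      if _msvc_version(pid) is not None}
--     sdk_versions = {_sdk_version(pid): pid for pid in distinct
--                     if _sdk_version(pid) is not None}
--     return packages, msvc_versions, sdk_versions
-- ===== Notes on version B (the rewrite author's own statement) =====
-- stated objective: alternative
-- what changed: A accumulates groups in one setdefault/append pass and then classifies the distinct ids with an if/elif chain; B instead precomputes the lowered ids, dedups them, builds each group by filtering the whole package list per distinct id (dict comprehension, no accumulating dict), and fills the two version dicts by two independent extractor functions mapped over the distinct ids (the elif disappears because the MSVC and SDK prefixes are mutually exclusive).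
import Mathlib
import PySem

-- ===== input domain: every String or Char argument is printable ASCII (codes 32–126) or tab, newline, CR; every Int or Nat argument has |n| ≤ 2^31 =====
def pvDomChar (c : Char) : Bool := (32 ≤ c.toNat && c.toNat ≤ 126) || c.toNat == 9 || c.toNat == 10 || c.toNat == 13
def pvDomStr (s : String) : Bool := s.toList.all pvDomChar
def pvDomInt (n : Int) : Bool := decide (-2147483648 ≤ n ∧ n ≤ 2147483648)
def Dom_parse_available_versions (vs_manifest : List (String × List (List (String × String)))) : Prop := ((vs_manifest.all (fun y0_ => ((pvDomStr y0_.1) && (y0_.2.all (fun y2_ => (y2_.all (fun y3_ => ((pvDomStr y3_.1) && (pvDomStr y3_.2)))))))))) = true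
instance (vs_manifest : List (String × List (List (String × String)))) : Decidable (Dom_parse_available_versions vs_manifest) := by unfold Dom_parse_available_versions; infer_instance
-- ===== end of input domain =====

-- B replaces A's setdefault-accumulation + if/elif second pass by dedup'd ids, per-key filtering
-- for the groups, and two independent version extractors; equal output, no speed claim.

-- ===== PORT A =====
-- package["id"].lower() (KeyError excluded by Pre_; getD "" is unreachable under Pre_)
def pvPackageId (package : List (String × String)) : String :=
  PySem.Str.lower (((PySem.Dict.mk package).get? "id").getD "")

-- A's second-loop body: the if/elif MSVC/SDK classification of one package_id.
-- version[0] is ported by PySem.Str.pyGet?; 'none' (Python IndexError) cannot occur because the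
-- prefix/suffix guard forces a non-empty version; isnumeric = isdigit on the ASCII domain.
def pvClassify (ms : PySem.Dict String String × PySem.Dict String String) (package_id : String) :
    PySem.Dict String String × PySem.Dict String String :=
  if PySem.Str.startswith package_id "microsoft.vc."
      && PySem.Str.endswith package_id ".tools.hostx64.targetx64.base" then
    let version := PySem.Str.join "." (PySem.List.slice ((PySem.Str.split? package_id ".").getD []) (some 2) (some 4))
    if (PySem.Str.pyGet? version 0).elim false PySem.Chars.isdigit then
      (ms.1.insert version package_id, ms.2)
    else ms
  else if PySem.Str.startswith package_id "microsoft.visualstudio.component.windows10sdk."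
      || PySem.Str.startswith package_id "microsoft.visualstudio.component.windows11sdk." then
    let version := (PySem.List.pyGet? ((PySem.Str.split? package_id ".").getD []) (-1)).getD ""
    if PySem.Str.strIsdigit version then
      (ms.1, ms.2.insert version package_id)
    else ms
  else ms

def parse_available_versions (vs_manifest : List (String × List (List (String × String)))) : (List (String × List (List (String × String)))) × (List (String × String)) × (List (String × String)) :=
  -- vs_manifest["packages"] (KeyError excluded by Pre_)
  let pkgList := ((PySem.Dict.mk vs_manifest).get? "packages").getD []
  -- packages.setdefault(package_id, []).append(package)  ==  d[pid] = d.get(pid, []) + [package]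
  let packages := pkgList.foldl
    (fun d package => d.modify (pvPackageId package) [] (· ++ [package]))
    PySem.Dict.empty
  -- second loop: for package_id, package_list in packages.items() (package_list unused)
  let msSdk := packages.items.foldl (fun ms item => pvClassify ms item.1)
    (PySem.Dict.empty, PySem.Dict.empty)
  (packages.items, msSdk.1.items, msSdk.2.items)

-- ===== PORT B =====
-- _msvc_version(pid): same guards as the Python helper, returning Option String
def pvMsvcVersion (pid : String) : Option String :=
  if PySem.Str.startswith pid "microsoft.vc."
      && PySem.Str.endswith pid ".tools.hostx64.targetx64.base" then
    let version := PySem.Str.join "." (PySem.List.slice ((PySem.Str.split? pid ".").getD []) (some 2) (some 4))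
    if (PySem.Str.pyGet? version 0).elim false PySem.Chars.isdigit then some version else none
  else none

-- _sdk_version(pid): startswith(tuple) ported as ||
def pvSdkVersion (pid : String) : Option String :=
  if PySem.Str.startswith pid "microsoft.visualstudio.component.windows10sdk."
      || PySem.Str.startswith pid "microsoft.visualstudio.component.windows11sdk." then
    let version := (PySem.List.pyGet? ((PySem.Str.split? pid ".").getD []) (-1)).getD ""
    if PySem.Str.strIsdigit version then some version else none
  else none

def parse_available_versions_alt (vs_manifest : List (String × List (List (String × String)))) : (List (String × List (List (String × String)))) × (List (String × String)) × (List (String × String)) :=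
  let pkgs := ((PySem.Dict.mk vs_manifest).get? "packages").getD []
  -- ids = [p["id"].lower() for p in pkgs]; distinct = list(dict.fromkeys(ids))
  let ids := pkgs.map pvPackageId
  let distinct := PySem.List.dedup ids
  -- {pid: [p for i, p in zip(ids, pkgs) if i == pid] for pid in distinct}
  let packages := distinct.foldl
    (fun d pid => d.insert pid (((ids.zip pkgs).filter (fun q => q.1 == pid)).map (·.2)))
    PySem.Dict.empty
  -- {_msvc_version(pid): pid for pid in distinct if _msvc_version(pid) is not None}
  let msvc_versions := distinct.foldl
    (fun d pid => match pvMsvcVersion pid with | some v => d.insert v pid | none => d)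
    PySem.Dict.empty
  -- {_sdk_version(pid): pid for pid in distinct if _sdk_version(pid) is not None}
  let sdk_versions := distinct.foldl
    (fun d pid => match pvSdkVersion pid with | some v => d.insert v pid | none => d)
    PySem.Dict.empty
  (packages.items, msvc_versions.items, sdk_versions.items)

-- ===== PRECONDITION & SPEC =====
-- Pre_ excludes exactly the inputs on which Python A raises KeyError: a manifest without a
-- "packages" key, or one whose package list contains a package without an "id" key.
def Pre_parse_available_versions (vs_manifest : List (String × List (List (String × String)))) : Prop :=
  ((PySem.Dict.mk vs_manifest).get? "packages").isSome = true ∧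
  ∀ package ∈ ((PySem.Dict.mk vs_manifest).get? "packages").getD [],
    ((PySem.Dict.mk package).get? "id").isSome = true
instance (vs_manifest : List (String × List (List (String × String)))) : Decidable (Pre_parse_available_versions vs_manifest) := by unfold Pre_parse_available_versions; infer_instance
def pvWitness_parse_available_versions : (List (String × List (List (String × String)))) :=
  [("packages", [[("id", "Microsoft.VC.14.29.Tools.HostX64.TargetX64.base")],
                 [("id", "microsoft.visualstudio.component.windows10sdk.19041")]])]
def Spec_parse_available_versions (vs_manifest : List (String × List (List (String × String)))) (out : (List (String × List (List (String × String)))) × (List (String × String)) × (List (String × String))) : Prop := out = parse_available_versions_alt vs_manifest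
instance (vs_manifest : List (String × List (List (String × String)))) (out : (List (String × List (List (String × String)))) × (List (String × String)) × (List (String × String))) : Decidable (Spec_parse_available_versions vs_manifest out) := by unfold Spec_parse_available_versions; infer_instance

-- ===== CLAIM (what is proved, stated in full; the proofs are below) =====
def Claim_equal_parse_available_versions : Prop := ∀ (vs_manifest : List (String × List (List (String × String)))), Dom_parse_available_versions vs_manifest → Pre_parse_available_versions vs_manifest → Spec_parse_available_versions vs_manifest (parse_available_versions vs_manifest)

-- ===== LEMMAS AND PROOFS =====

-- the MSVC prefix and the SDK prefixes are mutually exclusive (they differ at position 11)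
theorem pv_excl {pid : String} (h : PySem.Str.startswith pid "microsoft.vc." = true) :
    PySem.Str.startswith pid "microsoft.visualstudio.component.windows10sdk." = false ∧
    PySem.Str.startswith pid "microsoft.visualstudio.component.windows11sdk." = false := by
  simp only [PySem.Str.startswith, PySem.Chars.startswith, List.isPrefixOf_iff_prefix] at h
  constructor <;>
  · apply Bool.eq_false_iff.mpr
    intro hc
    simp only [PySem.Str.startswith, PySem.Chars.startswith, List.isPrefixOf_iff_prefix] at hc
    exact absurd (List.prefix_of_prefix_length_le h hc (by decide)) (by decide)

-- one step of A's if/elif chain = B's two independent extractors (uses pv_excl for the elif)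
theorem pv_classify_step (m s : PySem.Dict String String) (pid : String) :
    pvClassify (m, s) pid =
      ((match pvMsvcVersion pid with | some v => m.insert v pid | none => m),
       (match pvSdkVersion pid with | some v => s.insert v pid | none => s)) := by
  unfold pvClassify pvMsvcVersion pvSdkVersion
  by_cases h1 : (PySem.Str.startswith pid "microsoft.vc."
      && PySem.Str.endswith pid ".tools.hostx64.targetx64.base") = true
  · obtain ⟨h10, h11⟩ := pv_excl (Bool.and_eq_true _ _ |>.mp h1).1
    simp only [h1, if_true, h10, h11, Bool.or_self, Bool.false_eq_true, if_false]
    split <;> rfl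
  · rw [if_neg h1, if_neg h1]
    by_cases h2 : (PySem.Str.startswith pid "microsoft.visualstudio.component.windows10sdk."
        || PySem.Str.startswith pid "microsoft.visualstudio.component.windows11sdk.") = true
    · simp only [h2, if_true]
      split <;> rfl
    · rw [if_neg h2, if_neg h2]

-- the paired classification fold splits into B's two independent folds
theorem pv_fold_split (L : List String) :
    ∀ (m s : PySem.Dict String String),
    L.foldl pvClassify (m, s) =
      (L.foldl (fun d pid => match pvMsvcVersion pid with | some v => d.insert v pid | none => d) m,
       L.foldl (fun d pid => match pvSdkVersion pid with | some v => d.insert v pid | none => d) s) := by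
  induction L with
  | nil => intro m s; rfl
  | cons p rest ih =>
    intro m s
    simp only [List.foldl_cons, pv_classify_step]
    exact ih _ _

-- A's second loop uses only the key of each item: fold over items = fold over keys.
theorem pv_items_fold (d : PySem.Dict String (List (List (String × String))))
    (init : PySem.Dict String String × PySem.Dict String String) :
    d.items.foldl (fun ms item => pvClassify ms item.1) init = d.keys.foldl pvClassify init := by
  have : d.keys = d.items.map (·.1) := rfl
  rw [this, List.foldl_map]

-- A's grouping dict, characterised: keys = dedup ids, values = the per-key filters of B.
theorem pv_group (pkgs : List (List (String × String))) :
    let dA := pkgs.foldl (fun d package => d.modify (pvPackageId package) [] (· ++ [package]))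
      PySem.Dict.empty
    dA.keys = PySem.List.dedup (pkgs.map pvPackageId) ∧ dA.keys.Nodup ∧
    ∀ pid, dA.getD pid [] =
      (((pkgs.map pvPackageId).zip pkgs).filter (fun q => q.1 == pid)).map (·.2) := by
  intro dA
  have hfold : dA = (pkgs.map (fun p => (pvPackageId p, p))).foldl
      (fun d q => d.modify q.1 [] (· ++ [q.2])) PySem.Dict.empty := by
    rw [List.foldl_map]
  have hzip : (pkgs.map pvPackageId).zip pkgs = pkgs.map (fun p => (pvPackageId p, p)) := by
    have h := List.zip_map' (f := pvPackageId) (g := id) (l := pkgs)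
    simpa using h
  refine ⟨?_, ?_, ?_⟩
  · have := PySem.Dict.keys_foldl_modify_key pkgs pvPackageId []
      (fun _ x => (· ++ [x])) PySem.Dict.empty
    simpa [PySem.Dict.keys_empty] using this
  · exact PySem.Dict.nodup_keys_foldl_modify_key pkgs pvPackageId []
      (fun _ x => (· ++ [x])) PySem.Dict.empty (by simp [PySem.Dict.keys_empty])
  · intro pid
    rw [hfold, PySem.Dict.getD_foldl_modify_append, hzip]
    simp [PySem.Dict.getD_empty]

-- B's grouping comprehension over distinct (hence fresh) keys, characterised
theorem pv_items_B (L : List String) (v : String → List (List (String × String)))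
    (h : L.Nodup) :
    (L.foldl (fun d pid => d.insert pid (v pid)) PySem.Dict.empty).items =
      L.map (fun pid => (pid, v pid)) := by
  have hx := PySem.Dict.items_foldl_insert_fresh L (fun pid => pid) v PySem.Dict.empty
    (fun _ _ => PySem.Dict.contains_empty _) (by simpa using h)
  simpa using hx

-- ===== VERDICT (by name: the statement is the Claim_ definition above) =====
theorem parse_available_versions_spec : Claim_equal_parse_available_versions := by
  intro vs _ _
  unfold Spec_parse_available_versions parse_available_versions parse_available_versions_alt
  dsimp only
  obtain ⟨hkeys, hnd, hval⟩ := pv_group (((PySem.Dict.mk vs).get? "packages").getD [])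
  rw [pv_items_fold, hkeys, pv_fold_split]
  refine congrArg₂ Prod.mk ?_ rfl
  -- the grouping items coincide
  rw [PySem.Dict.items_eq_map_keys _ hnd ([] : List (List (String × String))), hkeys,
    pv_items_B _ _ (PySem.List.nodup_dedup _)]
  exact List.map_congr_left (fun pid _ => by rw [hval pid])
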